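-- pv_equiv track=rewrite | github.com/frederikho/dynamic-coalition-formation | scripts/simple_cycle_ordinal_sweep.py | _extract_error_line
-- ===== SOURCE A (Python) =====
-- def _extract_error_line(message: str) -> str:
--     if not message:
--         return ""
--     for line in message.splitlines():
--         line = line.strip()
--         if "strategy error with player" in line:
--             return line
--     for line in message.splitlines():
--         line = line.strip()
--         if line and not line.startswith("The value functions V are:"):
--             return line
--     return ""
-- ===== SOURCE B (Python) =====
-- def _extract_error_line(message: str) -> str:
--     fallback = None
--     for raw in message.splitlines():
--         line = raw.strip()
--         if "strategy error with player" in line: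
--             return line
--         if fallback is None and line and not line.startswith("The value functions V are:"):
--             fallback = line
--     return fallback if fallback is not None else ""
-- ===== Notes on version B (the rewrite author's own statement) =====
-- stated objective: simpler
-- what changed: Single pass over splitlines with a saved fallback candidate instead of A's two sequential scans of the message.
import Mathlib
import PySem

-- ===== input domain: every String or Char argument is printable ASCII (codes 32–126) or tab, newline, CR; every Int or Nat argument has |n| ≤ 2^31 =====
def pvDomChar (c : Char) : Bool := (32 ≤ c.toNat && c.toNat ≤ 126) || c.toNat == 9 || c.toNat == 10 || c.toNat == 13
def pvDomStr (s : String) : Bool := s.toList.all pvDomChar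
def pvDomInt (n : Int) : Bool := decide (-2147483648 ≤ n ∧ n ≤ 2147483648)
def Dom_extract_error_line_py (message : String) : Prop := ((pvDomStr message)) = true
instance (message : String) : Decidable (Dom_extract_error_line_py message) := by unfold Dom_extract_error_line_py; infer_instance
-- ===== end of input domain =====

-- B replaces A's two sequential scans of the message by one pass that saves a fallback candidate (objective: simpler).

-- ===== PORT A =====
-- A's first loop: the first stripped line containing "strategy error with player"
def pvALoop1 : List String → Option String
  | [] => none
  | l :: rest =>
      let line := PySem.Str.strip l
      if PySem.Str.isIn "strategy error with player" line then some line else pvALoop1 rest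

-- A's second loop: the first stripped non-empty line not starting with the V header
def pvALoop2 : List String → Option String
  | [] => none
  | l :: rest =>
      let line := PySem.Str.strip l
      if line != "" && !(PySem.Str.startswith line "The value functions V are:") then some line
      else pvALoop2 rest

def extract_error_line_py (message : String) : String :=
  if message = "" then ""
  else
    match pvALoop1 (PySem.Str.splitlines message) with
    | some line => line
    | none =>
      match pvALoop2 (PySem.Str.splitlines message) with
      | some line => line
      | none => ""

-- ===== PORT B =====
-- B's single pass: return a strategy-error line immediately, otherwise remember the first fallback
def pvBLoop : List String → Option String → String
  | [], fallback => fallback.getD ""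
  | l :: rest, fallback =>
      let line := PySem.Str.strip l
      if PySem.Str.isIn "strategy error with player" line then line
      else
        pvBLoop rest
          (if fallback.isNone && line != "" && !(PySem.Str.startswith line "The value functions V are:")
           then some line else fallback)

def extract_error_line_py_alt (message : String) : String :=
  pvBLoop (PySem.Str.splitlines message) none

-- ===== PRECONDITION & SPEC =====
def Spec_extract_error_line_py (message : String) (out : String) : Prop := out = extract_error_line_py_alt message
instance (message : String) (out : String) : Decidable (Spec_extract_error_line_py message out) := by unfold Spec_extract_error_line_py; infer_instance

-- ===== CLAIM (what is proved, stated in full; the proofs are below) =====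
def Claim_equal_extract_error_line_py : Prop := ∀ (message : String), Dom_extract_error_line_py message → Spec_extract_error_line_py message (extract_error_line_py message)

-- ===== LEMMAS AND PROOFS =====
-- loop invariant: B's single pass equals A's two passes with the pending fallback candidate
lemma pvBLoop_eq (ls : List String) (fb : Option String) :
    pvBLoop ls fb =
      match pvALoop1 ls with
      | some line => line
      | none =>
        match fb with
        | some f => f
        | none => (pvALoop2 ls).getD "" := by
  induction ls generalizing fb with
  | nil => cases fb <;> simp [pvBLoop, pvALoop1, pvALoop2]
  | cons l rest ih =>
    simp only [pvBLoop, pvALoop1, pvALoop2]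
    by_cases h1 : PySem.Str.isIn "strategy error with player" (PySem.Str.strip l) = true
    · simp only [h1, if_true]
    · simp only [Bool.not_eq_true] at h1
      simp only [h1, Bool.false_eq_true, if_false]
      rw [ih]
      cases fb with
      | some f => simp
      | none =>
        by_cases h2 : ((PySem.Str.strip l != "") && !(PySem.Str.startswith (PySem.Str.strip l) "The value functions V are:")) = true
        · simp only [Option.isNone_none, Bool.true_and, h2, if_true]
          cases pvALoop1 rest <;> rfl
        · simp only [Bool.not_eq_true] at h2
          simp only [Option.isNone_none, Bool.true_and, h2, Bool.false_eq_true, if_false]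

-- ===== VERDICT (by name: the statement is the Claim_ definition above) =====
theorem extract_error_line_py_spec : Claim_equal_extract_error_line_py := by
  intro message _
  unfold Spec_extract_error_line_py extract_error_line_py extract_error_line_py_alt
  by_cases hm : message = ""
  · subst hm
    rfl
  · simp only [hm, if_false]
    rw [pvBLoop_eq]
    cases pvALoop1 (PySem.Str.splitlines message) with
    | some line => rfl
    | none => cases h2 : pvALoop2 (PySem.Str.splitlines message) <;> rfl
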